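-- pv_equiv track=rewrite | github.com/TUCN1022/COMP9021 | 9021/ASS1/test1/superpower1.py | maximum_overall_power_fourth
-- ===== SOURCE A (Python) =====
-- def maximum_overall_power_fourth(powers):
--     result = -1e7
--     for max_value in range(0, len(powers) + 1):
--         for i in range(0, len(powers) - max_value + 1):
--             temp_result = 0
--             for j in range(0, len(powers)):
--                 if j in range(i, i + max_value):
--                     temp_result += powers[j] * -1
--                 else:
--                     temp_result += powers[j]
--             if temp_result > result:
--                 result = temp_result
--     return result
-- ===== SOURCE B (Python) =====
-- def maximum_overall_power_fourth(powers):
--     # Negating one contiguous (possibly empty) subarray maximises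
--     # total - 2 * (min contiguous subarray sum); Kadane for the min, O(n).
--     total = sum(powers)
--     cur = 0
--     best = 0
--     for x in powers:
--         cur = min(cur + x, x)
--         if cur < best:
--             best = cur
--     return total - 2 * best
-- ===== Notes on version B (the rewrite author's own statement) =====
-- stated objective: faster
-- what changed: Replaced the triple loop over (segment length, start, index) maximising the sum with one chosen segment negated by a single Kadane pass computing the minimum contiguous-subarray sum (empty allowed) and returning total - 2*min.
import Mathlib
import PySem

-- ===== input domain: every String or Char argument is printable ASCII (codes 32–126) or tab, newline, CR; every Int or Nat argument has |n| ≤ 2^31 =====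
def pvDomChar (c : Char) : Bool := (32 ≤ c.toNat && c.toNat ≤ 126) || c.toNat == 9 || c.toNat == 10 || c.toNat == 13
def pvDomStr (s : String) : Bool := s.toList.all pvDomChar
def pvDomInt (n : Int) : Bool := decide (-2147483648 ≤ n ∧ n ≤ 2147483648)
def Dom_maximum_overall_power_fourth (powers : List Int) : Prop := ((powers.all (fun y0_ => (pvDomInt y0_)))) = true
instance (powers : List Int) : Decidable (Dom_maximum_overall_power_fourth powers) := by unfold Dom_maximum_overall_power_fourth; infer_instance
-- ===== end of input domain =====

-- B replaces A's cubic triple loop by a single Kadane pass (total - 2 * min contiguous-subarray sum): faster.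
-- Python A initialises `result` to the float -1e7; that sentinel is always strictly exceeded by some
-- iteration (the empty-segment iteration and the whole-array iteration give max(S,-S) ≥ 0 > -1e7),
-- so the returned value is always an int and the sentinel is ported as the integer -10000000.

-- ===== PORT A =====
def maximum_overall_power_fourth (powers : List Int) : Int :=
  (PySem.List.pyRange 0 ((powers.length : Int) + 1) 1).foldl (fun result max_value =>
    (PySem.List.pyRange 0 ((powers.length : Int) - max_value + 1) 1).foldl (fun result i =>
      let temp_result :=
        (PySem.List.pyRange 0 (powers.length : Int) 1).foldl (fun temp_result j =>
          if j ∈ PySem.List.pyRange i (i + max_value) 1 then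
            temp_result + PySem.List.pyGetD powers j 0 * (-1)
          else
            temp_result + PySem.List.pyGetD powers j 0) 0
      if temp_result > result then temp_result else result) result)
    (-10000000)

-- ===== PORT B =====
def maximum_overall_power_fourth_alt (powers : List Int) : Int :=
  let total := powers.foldl (· + ·) 0
  let cb := powers.foldl (fun (cb : Int × Int) x =>
      let cur := min (cb.1 + x) x
      (cur, if cur < cb.2 then cur else cb.2)) (0, 0)
  total - 2 * cb.2

-- ===== PRECONDITION & SPEC =====
def Spec_maximum_overall_power_fourth (powers : List Int) (out : Int) : Prop := out = maximum_overall_power_fourth_alt powers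
instance (powers : List Int) (out : Int) : Decidable (Spec_maximum_overall_power_fourth powers out) := by unfold Spec_maximum_overall_power_fourth; infer_instance

-- ===== CLAIM (what is proved, stated in full; the proofs are below) =====
def Claim_equal_maximum_overall_power_fourth : Prop := ∀ (powers : List Int), Dom_maximum_overall_power_fourth powers → Spec_maximum_overall_power_fourth powers (maximum_overall_power_fourth powers)

-- ===== LEMMAS AND PROOFS =====

-- minimum sum of a NONEMPTY prefix ([] is a dummy value, only used under `l ≠ []`)
def mnp : List Int → Int
  | [] => 0
  | x :: xs => min x (x + mnp xs)

-- minimum sum of a NONEMPTY contiguous segment ([] is a dummy value)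
def msn : List Int → Int
  | [] => 0
  | [x] => x
  | x :: y :: ys => min (min x (x + mnp (y :: ys))) (msn (y :: ys))

-- the common value both programs compute: total sum minus twice the minimum
-- contiguous-segment sum (empty segment allowed)
def specVal (l : List Int) : Int := l.sum - 2 * min 0 (msn l)

-- ---------- B side ----------

def kstep (cb : Int × Int) (x : Int) : Int × Int :=
  let cur := min (cb.1 + x) x
  (cur, if cur < cb.2 then cur else cb.2)

-- running minimum of Kadane's `cur` trajectory (value `c` if the list is empty)
def mb (c : Int) : List Int → Int
  | [] => c
  | x :: xs => min (min (c + x) x) (mb (min (c + x) x) xs)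

lemma foldl_kstep (l : List Int) : ∀ c b : Int, b ≤ c →
    (l.foldl kstep (c, b)).2 = min b (mb c l) := by
  induction l with
  | nil => intro c b h; simp only [List.foldl_nil, mb]; omega
  | cons x xs ih =>
      intro c b h
      have h1 : kstep (c, b) x = (min (c + x) x, min b (min (c + x) x)) := by
        simp only [kstep, Prod.mk.injEq]
        exact ⟨trivial, by split <;> omega⟩
      rw [List.foldl_cons, h1, ih _ _ (by omega)]
      simp only [mb]
      omega

lemma msn_le_mnp : ∀ (l : List Int), l ≠ [] → msn l ≤ mnp l := by
  intro l _
  match l with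
  | [x] => simp [msn, mnp]
  | x :: y :: ys => simp only [msn, mnp]; omega

lemma mb_eq : ∀ (l : List Int), l ≠ [] → ∀ c : Int, mb c l = min (c + mnp l) (msn l) := by
  intro l
  induction l with
  | nil => simp
  | cons x xs ih =>
      intro _ c
      cases xs with
      | nil => simp only [mb, mnp, msn]; omega
      | cons y ys =>
          have hstep : mb c (x :: y :: ys)
              = min (min (c + x) x) (mb (min (c + x) x) (y :: ys)) := rfl
          rw [hstep, ih (by simp) (min (c + x) x)]
          simp only [mnp, msn]
          omega

lemma b_eq_specVal (l : List Int) : maximum_overall_power_fourth_alt l = specVal l := by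
  have hdef : maximum_overall_power_fourth_alt l
      = l.foldl (· + ·) 0 - 2 * (l.foldl kstep (0, 0)).2 := rfl
  have hsum : l.foldl (· + ·) (0 : Int) = l.sum := List.sum_eq_foldl.symm
  rw [hdef, hsum, foldl_kstep l 0 0 le_rfl]
  cases l with
  | nil => simp [mb, specVal, msn]
  | cons x xs =>
      rw [mb_eq (x :: xs) (by simp) 0]
      have hle := msn_le_mnp (x :: xs) (by simp)
      unfold specVal
      omega

-- ---------- A side ----------

-- bound: the minimum-with-0 segment sum is ≤ every (drop i).take k sum
lemma mnp_le_take : ∀ (xs : List Int) (x : Int) (k : Nat),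
    mnp (x :: xs) ≤ x + (xs.take k).sum := by
  intro xs
  induction xs with
  | nil => intro x k; simp [mnp]
  | cons y ys ih =>
      intro x k
      cases k with
      | zero => simp only [List.take_zero, List.sum_nil, mnp]; omega
      | succ k =>
          have hih := ih y k
          simp only [List.take_succ_cons, List.sum_cons]
          simp only [mnp] at hih ⊢
          omega

lemma mnp_cons (x : Int) (xs : List Int) : mnp (x :: xs) = min x (x + mnp xs) := rfl

lemma msn_cons3 (x y : Int) (ys : List Int) :
    msn (x :: y :: ys) = min (min x (x + mnp (y :: ys))) (msn (y :: ys)) := rfl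

lemma msn_cons_le (x y : Int) (ys : List Int) : msn (x :: y :: ys) ≤ msn (y :: ys) := by
  rw [show msn (x :: y :: ys) = min (min x (x + mnp (y :: ys))) (msn (y :: ys)) from rfl]
  omega

lemma min0msn_le_seg : ∀ (l : List Int) (i k : Nat),
    min 0 (msn l) ≤ ((l.drop i).take k).sum := by
  intro l
  induction l with
  | nil => intro i k; simp [msn]
  | cons x xs ih =>
      intro i k
      cases i with
      | zero =>
          cases k with
          | zero =>
              simp only [List.drop_zero, List.take_zero, List.sum_nil]
              omega
          | succ k =>
              have h1 := mnp_le_take xs x k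
              have h2 := msn_le_mnp (x :: xs) (by simp)
              simp only [List.drop_zero, List.take_succ_cons, List.sum_cons]
              omega
      | succ i =>
          have h1 := ih i k
          have h2 : min 0 (msn (x :: xs)) ≤ min 0 (msn xs) := by
            cases xs with
            | nil => simp only [msn]; omega
            | cons y ys =>
                have := msn_cons_le x y ys
                omega
          simpa [List.drop_succ_cons] using le_trans h2 h1

-- the bound is achieved by some admissible pair (i, k)
lemma mnp_achieve : ∀ (l : List Int), l ≠ [] →
    ∃ k : Nat, 1 ≤ k ∧ k ≤ l.length ∧ (l.take k).sum = mnp l := by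
  intro l
  induction l with
  | nil => simp
  | cons x xs ih =>
      intro _
      cases xs with
      | nil => exact ⟨1, by simp [mnp]⟩
      | cons y ys =>
          by_cases h : x ≤ x + mnp (y :: ys)
          · refine ⟨1, by omega, by simp, ?_⟩
            simp only [List.take_succ_cons, List.take_zero, List.sum_cons, List.sum_nil]
            rw [mnp_cons x (y :: ys)]
            omega
          · obtain ⟨k, hk1, hk2, hk3⟩ := ih (by simp)
            refine ⟨k + 1, by omega, by simpa using hk2, ?_⟩
            simp only [List.take_succ_cons, List.sum_cons, hk3]
            rw [mnp_cons x (y :: ys)]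
            omega

lemma msn_achieve : ∀ (l : List Int), l ≠ [] →
    ∃ i k : Nat, 1 ≤ k ∧ i + k ≤ l.length ∧ ((l.drop i).take k).sum = msn l := by
  intro l
  induction l with
  | nil => simp
  | cons x xs ih =>
      intro _
      cases xs with
      | nil => exact ⟨0, 1, by omega, by simp, by simp [msn]⟩
      | cons y ys =>
          by_cases h : mnp (x :: y :: ys) ≤ msn (y :: ys)
          · obtain ⟨k, hk1, hk2, hk3⟩ := mnp_achieve (x :: y :: ys) (by simp)
            refine ⟨0, k, hk1, by simpa using hk2, ?_⟩
            rw [List.drop_zero, hk3]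
            show mnp (x :: y :: ys) = msn (x :: y :: ys)
            rw [mnp_cons x (y :: ys)] at h
            rw [msn_cons3 x y ys, mnp_cons x (y :: ys)]
            omega
          · obtain ⟨i, k, hk1, hk2, hk3⟩ := ih (by simp)
            refine ⟨i + 1, k, hk1, by simp only [List.length_cons] at hk2 ⊢; omega, ?_⟩
            rw [List.drop_succ_cons, hk3]
            show msn (y :: ys) = msn (x :: y :: ys)
            rw [mnp_cons x (y :: ys)] at h
            rw [msn_cons3 x y ys]
            omega

lemma min0msn_achieve (l : List Int) :
    ∃ i k : Nat, i + k ≤ l.length ∧ ((l.drop i).take k).sum = min 0 (msn l) := by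
  by_cases h : 0 ≤ msn l
  · exact ⟨0, 0, by omega, by simp; omega⟩
  · have hne : l ≠ [] := by
      intro he; rw [he] at h; simp [msn] at h
    obtain ⟨i, k, _, hk2, hk3⟩ := msn_achieve l hne
    exact ⟨i, k, hk2, by rw [hk3]; omega⟩

lemma specVal_nonneg (l : List Int) : 0 ≤ specVal l := by
  have hm0 : min 0 (msn l) ≤ 0 := by omega
  have hms : min 0 (msn l) ≤ l.sum := by
    cases l with
    | nil => simp
    | cons x xs =>
        have h1 := mnp_le_take xs x xs.length
        have h2 := msn_le_mnp (x :: xs) (by simp)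
        rw [List.take_length] at h1
        simp only [List.sum_cons]
        omega
  unfold specVal
  omega

-- the inner loop over j computes  l.sum - 2 * (segment sum)
lemma foldl_addMul (xs : List Int) (c : Int) : ∀ (n : Nat) (a b init : Int),
    n = (b - a).toNat → 0 ≤ a → b ≤ (xs.length : Int) →
    (PySem.List.pyRange a b 1).foldl (fun t j => t + PySem.List.pyGetD xs j 0 * c) init
      = init + c * ((xs.drop a.toNat).take n).sum := by
  intro n
  induction n with
  | zero =>
      intro a b init hn ha hb
      rw [PySem.List.pyRange_one_eq_nil (by omega)]
      simp
  | succ n ih =>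
      intro a b init hn ha hb
      have hab : a < b := by omega
      have halen : a < (xs.length : Int) := by omega
      rw [PySem.List.pyRange_one_cons hab, List.foldl_cons,
        ih (a + 1) b _ (by omega) (by omega) hb,
        PySem.List.pyGetD_eq_getElem xs 0 ha halen]
      have hdrop : xs.drop a.toNat
          = xs[a.toNat]'(by omega) :: xs.drop (a.toNat + 1) :=
        (List.getElem_cons_drop (by omega)).symm
      have htn : (a + 1).toNat = a.toNat + 1 := by omega
      rw [htn, hdrop, List.take_succ_cons, List.sum_cons]
      ring

lemma temp_eq (xs : List Int) (mv i : Int) (hm : 0 ≤ mv) (hi : 0 ≤ i)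
    (him : i + mv ≤ (xs.length : Int)) :
    (PySem.List.pyRange 0 (xs.length : Int) 1).foldl (fun t j =>
        if j ∈ PySem.List.pyRange i (i + mv) 1 then t + PySem.List.pyGetD xs j 0 * (-1)
        else t + PySem.List.pyGetD xs j 0) 0
      = xs.sum - 2 * ((xs.drop i.toNat).take mv.toNat).sum := by
  rw [PySem.List.pyRange_one_append 0 i (xs.length : Int) hi (by omega),
    PySem.List.pyRange_one_append i (i + mv) (xs.length : Int) (by omega) him,
    List.foldl_append, List.foldl_append]
  have e1 : ∀ (acc : Int), ∀ j ∈ PySem.List.pyRange 0 i 1,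
      (if j ∈ PySem.List.pyRange i (i + mv) 1 then acc + PySem.List.pyGetD xs j 0 * (-1)
       else acc + PySem.List.pyGetD xs j 0) = acc + PySem.List.pyGetD xs j 0 * 1 := by
    intro acc j hj
    rw [PySem.List.mem_pyRange_one] at hj
    rw [if_neg (by rw [PySem.List.mem_pyRange_one]; omega)]
    ring
  have e2 : ∀ (acc : Int), ∀ j ∈ PySem.List.pyRange i (i + mv) 1,
      (if j ∈ PySem.List.pyRange i (i + mv) 1 then acc + PySem.List.pyGetD xs j 0 * (-1)
       else acc + PySem.List.pyGetD xs j 0) = acc + PySem.List.pyGetD xs j 0 * (-1) := by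
    intro acc j hj
    rw [if_pos hj]
  have e3 : ∀ (acc : Int), ∀ j ∈ PySem.List.pyRange (i + mv) (xs.length : Int) 1,
      (if j ∈ PySem.List.pyRange i (i + mv) 1 then acc + PySem.List.pyGetD xs j 0 * (-1)
       else acc + PySem.List.pyGetD xs j 0) = acc + PySem.List.pyGetD xs j 0 * 1 := by
    intro acc j hj
    rw [PySem.List.mem_pyRange_one] at hj
    rw [if_neg (by rw [PySem.List.mem_pyRange_one]; omega)]
    ring
  rw [PySem.List.foldl_congr_mem _ _ _ _ e1, foldl_addMul xs 1 i.toNat 0 i 0 (by omega) le_rfl (by omega)]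
  rw [PySem.List.foldl_congr_mem _ _ _ _ e2, foldl_addMul xs (-1) mv.toNat i (i + mv) _ (by omega) hi (by omega)]
  rw [PySem.List.foldl_congr_mem _ _ _ _ e3,
    foldl_addMul xs 1 ((xs.length : Int) - (i + mv)).toNat (i + mv) (xs.length : Int) _ (by omega) (by omega) le_rfl]
  -- sum decomposition
  have hsplit1 : (xs.take i.toNat).sum + (xs.drop i.toNat).sum = xs.sum :=
    List.sum_take_add_sum_drop xs i.toNat
  have hsplit2 : ((xs.drop i.toNat).take mv.toNat).sum + ((xs.drop i.toNat).drop mv.toNat).sum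
      = (xs.drop i.toNat).sum := List.sum_take_add_sum_drop _ mv.toNat
  have hdd : (xs.drop i.toNat).drop mv.toNat = xs.drop (i + mv).toNat := by
    rw [List.drop_drop]
    congr 1
    omega
  have htake0 : (xs.drop 0).take i.toNat = xs.take i.toNat := by simp
  have htake3 : (xs.drop (i + mv).toNat).take ((xs.length : Int) - (i + mv)).toNat
      = xs.drop (i + mv).toNat := by
    apply List.take_of_length_le
    simp only [List.length_drop]
    omega
  rw [hdd] at hsplit2
  simp only [Int.toNat_zero, List.drop_zero]
  rw [htake3]
  omega

-- nested running-max loops flatten to one foldl max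
lemma foldl_foldl_max (A : List Int) (g : Int → List Int) : ∀ r : Int,
    A.foldl (fun r m => (g m).foldl max r) r = (A.flatMap g).foldl max r := by
  induction A with
  | nil => intro r; simp
  | cons a as ih => intro r; simp [List.flatMap_cons, List.foldl_append, ih]

lemma a_eq_specVal (l : List Int) : maximum_overall_power_fourth l = specVal l := by
  set n : Int := (l.length : Int) with hn
  set T : Int → Int → Int := fun mv i =>
    (PySem.List.pyRange 0 n 1).foldl (fun t j =>
      if j ∈ PySem.List.pyRange i (i + mv) 1 then t + PySem.List.pyGetD l j 0 * (-1)
      else t + PySem.List.pyGetD l j 0) 0 with hT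
  have hA : maximum_overall_power_fourth l
      = ((PySem.List.pyRange 0 (n + 1) 1).flatMap
          (fun mv => (PySem.List.pyRange 0 (n - mv + 1) 1).map (T mv))).foldl max (-10000000) := by
    unfold maximum_overall_power_fourth
    rw [← foldl_foldl_max]
    apply PySem.List.foldl_congr_mem
    intro r mv _
    rw [List.foldl_map]
    apply PySem.List.foldl_congr_mem
    intro acc i _
    show (if T mv i > acc then T mv i else acc) = max acc (T mv i)
    omega
  set L : List Int := (PySem.List.pyRange 0 (n + 1) 1).flatMap
      (fun mv => (PySem.List.pyRange 0 (n - mv + 1) 1).map (T mv)) with hL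
  -- every member of L is ≤ specVal l
  have hub : ∀ t ∈ L, t ≤ specVal l := by
    intro t ht
    rw [hL, List.mem_flatMap] at ht
    obtain ⟨mv, hmv, ht⟩ := ht
    rw [List.mem_map] at ht
    obtain ⟨i, hi, rfl⟩ := ht
    rw [PySem.List.mem_pyRange_one] at hmv hi
    rw [hT]
    simp only []
    rw [temp_eq l mv i (by omega) (by omega) (by omega)]
    have := min0msn_le_seg l i.toNat mv.toNat
    unfold specVal
    omega
  -- specVal l is a member of L
  have hmem : specVal l ∈ L := by
    obtain ⟨i, k, hik, hsum⟩ := min0msn_achieve l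
    rw [hL, List.mem_flatMap]
    refine ⟨(k : Int), by rw [PySem.List.mem_pyRange_one]; omega, ?_⟩
    rw [List.mem_map]
    refine ⟨(i : Int), by rw [PySem.List.mem_pyRange_one]; omega, ?_⟩
    rw [hT]
    simp only []
    rw [temp_eq l (k : Int) (i : Int) (by omega) (by omega) (by omega)]
    simp only [Int.toNat_natCast]
    rw [hsum]
    unfold specVal
    ring
  have hge := (PySem.List.le_foldl_max L (-10000000)).2 _ hmem
  have hpos := specVal_nonneg l
  rcases PySem.List.foldl_max_mem L (-10000000) with hcase | hcase
  · rw [hcase] at hge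
    exact absurd hge (by omega)
  · have hle := hub _ hcase
    rw [hA]
    omega

-- ===== VERDICT (by name: the statement is the Claim_ definition above) =====
theorem maximum_overall_power_fourth_spec : Claim_equal_maximum_overall_power_fourth := by
  intro powers _
  unfold Spec_maximum_overall_power_fourth
  rw [a_eq_specVal, b_eq_specVal]
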